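-- pv_equiv track=rewrite | github.com/MaxTezza/MaxOS | max_os/learning/prompt_filter.py | _make_casual
-- ===== SOURCE A (Python) =====
-- def _make_casual(message: str) -> str:
--     """Make message more casual."""
--     # Add casual contractions
--     replacements = {
--         'cannot': "can't",
--         'is not': "isn't",
--         'are not': "aren't",
--         'does not': "doesn't",
--         'do not': "don't",
--         'will not': "won't",
--         'have not': "haven't",
--     }
--
--     for formal, casual in replacements.items():
--         message = message.replace(formal, casual)
--
--     return message
-- ===== SOURCE B (Python) =====
-- _CASUAL_PAIRS = (
--     ('cannot', "can't"),
--     ('is not', "isn't"),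
--     ('are not', "aren't"),
--     ('does not', "doesn't"),
--     ('do not', "don't"),
--     ('will not', "won't"),
--     ('have not', "haven't"),
-- )
--
--
-- def _make_casual(message: str) -> str:
--     """Make message more casual (single left-to-right scan with a phrase table)."""
--     out = []
--     i = 0
--     n = len(message)
--     while i < n:
--         for formal, casual in _CASUAL_PAIRS:
--             if message.startswith(formal, i):
--                 out.append(casual)
--                 i += len(formal)
--                 break
--         else:
--             out.append(message[i])
--             i += 1
--     return ''.join(out)
-- ===== Notes on version B (the rewrite author's own statement) =====
-- stated objective: alternative
-- what changed: Replaces seven successive full-string str.replace passes by a single left-to-right scan that, at each position, matches one of the seven formal phrases against a table and appends its contraction (or the current character) to an output buffer.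
import Mathlib
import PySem

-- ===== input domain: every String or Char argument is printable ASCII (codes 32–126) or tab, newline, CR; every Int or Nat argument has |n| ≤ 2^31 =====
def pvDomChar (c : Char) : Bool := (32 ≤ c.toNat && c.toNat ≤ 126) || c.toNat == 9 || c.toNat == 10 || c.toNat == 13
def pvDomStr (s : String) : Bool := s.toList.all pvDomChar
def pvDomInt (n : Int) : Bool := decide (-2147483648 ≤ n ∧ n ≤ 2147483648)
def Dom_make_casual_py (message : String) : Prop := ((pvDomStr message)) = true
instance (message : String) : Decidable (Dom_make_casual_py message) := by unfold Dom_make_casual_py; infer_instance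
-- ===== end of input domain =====

-- B replaces A's seven successive full-string replace passes by one left-to-right
-- scan with a phrase table (alternative decomposition, same return value).

-- ===== PORT A =====
-- the dict literal `replacements`, as an association list in insertion order
def casualReplacements : List (String × String) :=
  [("cannot", "can't"), ("is not", "isn't"), ("are not", "aren't"),
   ("does not", "doesn't"), ("do not", "don't"), ("will not", "won't"),
   ("have not", "haven't")]

def make_casual_py (message : String) : String :=
  casualReplacements.foldl (fun m fc => PySem.Str.replace m fc.1 fc.2) message

-- ===== PORT B =====
-- Source B's tuple _CASUAL_PAIRS, on the character-list side
def casualTab : List (List Char × List Char) :=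
  [("cannot".toList, "can't".toList), ("is not".toList, "isn't".toList),
   ("are not".toList, "aren't".toList), ("does not".toList, "doesn't".toList),
   ("do not".toList, "don't".toList), ("will not".toList, "won't".toList),
   ("have not".toList, "haven't".toList)]

-- termination helper for the scan: every formal phrase in the table is nonempty
theorem casualTab_fst_ne_nil : ∀ pc ∈ casualTab, pc.1 ≠ [] := by decide

-- hand port of Source B's scan loop (no PySem primitive covers a multi-pattern scan;
-- exact step for step: the first table entry matching at the current position
-- emits its contraction and skips the phrase, else the character is copied)
def casualScan : List Char → List Char
  | [] => []
  | c :: t =>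
    match hf : casualTab.find? (fun pc => pc.1.isPrefixOf (c :: t)) with
    | some pc => pc.2 ++ casualScan ((c :: t).drop pc.1.length)
    | none => c :: casualScan t
termination_by s => s.length
decreasing_by
  · have h1 : pc.1 ≠ [] := casualTab_fst_ne_nil pc (List.mem_of_find?_eq_some hf)
    have h2 : 0 < pc.1.length := List.length_pos_iff.mpr h1
    simp [List.length_drop]; omega
  · simp

def make_casual_py_alt (message : String) : String :=
  String.ofList (casualScan message.toList)

-- ===== PRECONDITION & SPEC =====
def Spec_make_casual_py (message : String) (out : String) : Prop := out = make_casual_py_alt message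
instance (message : String) (out : String) : Decidable (Spec_make_casual_py message out) := by unfold Spec_make_casual_py; infer_instance

-- ===== CLAIM (what is proved, stated in full; the proofs are below) =====
def Claim_equal_make_casual_py : Prop := ∀ (message : String), Dom_make_casual_py message → Spec_make_casual_py message (make_casual_py message)

-- ===== LEMMAS AND PROOFS =====
def replaceL (o : Char) (os new : List Char) : List Char → List Char
  | [] => []
  | c :: t =>
    if (o :: os).isPrefixOf (c :: t) then new ++ replaceL o os new (t.drop os.length)
    else c :: replaceL o os new t
termination_by l => l.length
decreasing_by
  · simp [List.length_drop]
  · simp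

theorem go_eq_replaceL (o : Char) (os new : List Char) :
    ∀ fuel s acc, s.length ≤ fuel →
      PySem.Chars.replace.go (o :: os) new fuel s acc = acc.reverse ++ replaceL o os new s := by
  intro fuel
  induction fuel with
  | zero =>
    intro s acc h
    have : s = [] := List.eq_nil_of_length_eq_zero (Nat.le_zero.mp h)
    subst this
    simp [PySem.Chars.replace.go, replaceL]
  | succ n ih =>
    intro s acc h
    cases s with
    | nil => simp [PySem.Chars.replace.go, replaceL]
    | cons c t =>
      rw [PySem.Chars.replace.go]
      by_cases hp : (o :: os).isPrefixOf (c :: t)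
      · rw [if_pos hp]
        rw [ih _ _ (by simp at h ⊢; omega)]
        rw [replaceL, if_pos hp]
        simp
      · rw [if_neg hp]
        rw [ih _ _ (by simp at h ⊢; omega)]
        rw [replaceL, if_neg hp]
        simp

theorem replace_eq_replaceL (o : Char) (os new s : List Char) :
    PySem.Chars.replace s (o :: os) new = replaceL o os new s := by
  rw [PySem.Chars.replace]
  simp [go_eq_replaceL o os new s.length s [] (le_refl _)]

theorem replaceL_pos {o : Char} {os s : List Char} (new : List Char) (h : (o :: os) <+: s) :
    replaceL o os new s = new ++ replaceL o os new (s.drop (o :: os).length) := by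
  cases s with
  | nil => exact absurd (List.eq_nil_of_prefix_nil h) (by simp)
  | cons c t =>
    rw [replaceL, if_pos (List.isPrefixOf_iff_prefix.mpr h)]
    simp

theorem replaceL_neg {o c : Char} {os t : List Char} (new : List Char) (h : ¬ (o :: os) <+: (c :: t)) :
    replaceL o os new (c :: t) = c :: replaceL o os new t := by
  rw [replaceL, if_neg (fun hb => h (List.isPrefixOf_iff_prefix.mp hb))]

theorem prefix_append_cases {a b z : List Char} (h : a <+: b ++ z) : a <+: b ∨ b <+: a := by
  exact List.prefix_or_prefix_of_prefix h (List.prefix_append b z)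

theorem replaceL_append_keep {o : Char} {os : List Char} (new : List Char) :
    ∀ (u : List Char),
    (∀ j < u.length, ¬ (o :: os) <+: u.drop j ∧ ¬ u.drop j <+: (o :: os)) →
    ∀ z, replaceL o os new (u ++ z) = u ++ replaceL o os new z := by
  intro u
  induction u with
  | nil => intro _ z; simp
  | cons c t ih =>
    intro H z
    have h0 := H 0 (by simp)
    simp only [List.drop_zero] at h0
    have hnp : ¬ (o :: os) <+: c :: (t ++ z) := by
      intro hp
      rcases prefix_append_cases (by simpa using hp : (o :: os) <+: (c :: t) ++ z) with h | h
      · exact h0.1 h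
      · exact h0.2 h
    show replaceL o os new (c :: (t ++ z)) = _
    rw [replaceL_neg new hnp]
    rw [ih (fun j hj => by simpa using H (j+1) (by simpa using hj)) z]
    simp

def suffixesNE (l : List Char) : List (List Char) :=
  (List.range l.length).map (fun j => l.drop j)

def casualFrags : List (List Char) := casualTab.flatMap (fun pc => suffixesNE pc.1)

theorem frags_ne_nil : ∀ x ∈ casualFrags, x ≠ [] := by decide
theorem frags_tail : ∀ x ∈ casualFrags, x.tail = [] ∨ x.tail ∈ casualFrags := by decide

theorem replaceL_preserve {o : Char} {os new : List Char}
    (hnew : ∀ x ∈ casualFrags, ¬ x <+: new ∧ ¬ new <+: x) :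
    ∀ n (s : List Char), s.length ≤ n → ∀ x ∈ casualFrags, ¬ x <+: s →
      ¬ x <+: replaceL o os new s := by
  intro n
  induction n with
  | zero =>
    intro s hlen x hx hxs
    have : s = [] := List.eq_nil_of_length_eq_zero (Nat.le_zero.mp hlen)
    subst this
    simpa [replaceL] using hxs
  | succ n ih =>
    intro s hlen x hx hxs
    cases s with
    | nil => simpa [replaceL] using hxs
    | cons c t =>
      by_cases hp : (o :: os) <+: (c :: t)
      · rw [replaceL_pos new hp]
        intro hcon
        rcases prefix_append_cases hcon with h | h
        · exact (hnew x hx).1 h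
        · exact (hnew x hx).2 h
      · rw [replaceL_neg new hp]
        intro hcon
        cases x with
        | nil => exact frags_ne_nil [] hx rfl
        | cons a q =>
          rw [List.cons_prefix_cons] at hcon
          obtain ⟨rfl, hq⟩ := hcon
          cases q with
          | nil => exact hxs (by simp)
          | cons b r =>
            have hqf : (b :: r) ∈ casualFrags := by
              rcases frags_tail (a :: b :: r) hx with h | h
              · simp at h
              · simpa using h
            have hqt : ¬ (b :: r) <+: t := fun h => hxs (List.cons_prefix_cons.mpr ⟨rfl, h⟩)
            exact ih t (by simp at hlen; omega) (b :: r) hqf hqt hq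

theorem tab_fst_mem_frags : ∀ pc ∈ casualTab, pc.1 ∈ casualFrags := by decide
theorem frags_vs_contractions :
    ∀ x ∈ casualFrags, ∀ pc ∈ casualTab, ¬ x <+: pc.2 ∧ ¬ pc.2 <+: x := by decide

def repC (s : List Char) (pc : List Char × List Char) : List Char :=
  PySem.Chars.replace s pc.1 pc.2

theorem repC_eq {pc : List Char × List Char} (s : List Char) :
    ∀ o os, pc.1 = o :: os → repC s pc = replaceL o os pc.2 s := by
  intro o os h
  rw [repC, h, replace_eq_replaceL]

theorem foldl_cons (ps : List (List Char × List Char)) (hsub : ∀ pc ∈ ps, pc ∈ casualTab) :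
    ∀ (c : Char) (t : List Char), (∀ pc ∈ ps, ¬ pc.1 <+: (c :: t)) →
      ps.foldl repC (c :: t) = c :: ps.foldl repC t := by
  induction ps with
  | nil => intro c t _; rfl
  | cons pc ps ih =>
    intro c t H
    have hpc := hsub pc (by simp)
    obtain ⟨o, os, ho⟩ := List.exists_cons_of_ne_nil (casualTab_fst_ne_nil pc hpc)
    have hstep : repC (c :: t) pc = c :: replaceL o os pc.2 t := by
      rw [repC_eq _ o os ho, replaceL_neg _ (ho ▸ H pc (by simp))]
    simp only [List.foldl_cons, hstep]
    have hrt : repC t pc = replaceL o os pc.2 t := repC_eq t o os ho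
    rw [← hrt]
    apply ih (fun qc hq => hsub qc (by simp [hq]))
    intro qc hq
    have hqtab := hsub qc (by simp [hq])
    have hqfrag : qc.1 ∈ casualFrags := tab_fst_mem_frags qc hqtab
    have : ¬ qc.1 <+: c :: t := H qc (by simp [hq])
    have hpres := replaceL_preserve (o := o) (os := os) (new := pc.2)
      (fun x hx => frags_vs_contractions x hx pc hpc) (c :: t).length (c :: t) le_rfl qc.1 hqfrag this
    rw [replaceL_neg _ (ho ▸ H pc (by simp))] at hpres
    rw [hrt]
    exact hpres

theorem foldl_keep (ps : List (List Char × List Char)) (hsub : ∀ pc ∈ ps, pc ∈ casualTab)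
    (u : List Char)
    (H : ∀ pc ∈ ps, ∀ j < u.length, ¬ pc.1 <+: u.drop j ∧ ¬ u.drop j <+: pc.1) :
    ∀ z, ps.foldl repC (u ++ z) = u ++ ps.foldl repC z := by
  induction ps generalizing u with
  | nil => intro z; rfl
  | cons pc ps ih =>
    intro z
    have hpc := hsub pc (by simp)
    obtain ⟨o, os, ho⟩ := List.exists_cons_of_ne_nil (casualTab_fst_ne_nil pc hpc)
    have hstep : repC (u ++ z) pc = u ++ replaceL o os pc.2 z := by
      rw [repC_eq _ o os ho]
      exact replaceL_append_keep pc.2 u (fun j hj => ho ▸ H pc (by simp) j hj) z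
    simp only [List.foldl_cons, hstep]
    rw [← repC_eq z o os ho]
    exact ih (fun qc hq => hsub qc (by simp [hq])) u
      (fun qc hq j hj => H qc (by simp [hq]) j hj) (repC z pc)

theorem phrase_cross :
    ∀ pc ∈ casualTab, ∀ qc ∈ casualTab, pc.1 ≠ qc.1 →
      ∀ j < qc.1.length, ¬ pc.1 <+: qc.1.drop j ∧ ¬ qc.1.drop j <+: pc.1 := by decide
theorem phrase_vs_contraction :
    ∀ pc ∈ casualTab, ∀ qc ∈ casualTab,
      ∀ j < qc.2.length, ¬ pc.1 <+: qc.2.drop j ∧ ¬ qc.2.drop j <+: pc.1 := by decide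
theorem tab_fst_nodup : (casualTab.map Prod.fst).Nodup := by decide

theorem pipeline_match {pc : List Char × List Char} (hpc : pc ∈ casualTab) {s : List Char}
    (hpre : pc.1 <+: s) :
    casualTab.foldl repC s = pc.2 ++ casualTab.foldl repC (s.drop pc.1.length) := by
  obtain ⟨z, rfl⟩ := hpre
  obtain ⟨l1, l2, htab⟩ := List.append_of_mem hpc
  obtain ⟨o, os, ho⟩ := List.exists_cons_of_ne_nil (casualTab_fst_ne_nil pc hpc)
  have hdrop : (pc.1 ++ z).drop pc.1.length = z := by simp
  rw [hdrop, htab]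
  have hfst : ∀ qc ∈ l1, qc.1 ≠ pc.1 := by
    intro qc hq heq
    have := tab_fst_nodup
    rw [htab] at this
    simp only [List.map_append, List.map_cons, List.nodup_append] at this
    have hm : pc.1 ∈ l1.map Prod.fst := heq ▸ List.mem_map_of_mem hq
    have hdis := this.2.2
    simp only [List.mem_map] at hm
    obtain ⟨q, hql1, hqfst⟩ := hm
    exact absurd hdis (by
      clear hdis
      simp
      exact ⟨pc.1, ⟨q.2, by rwa [show (pc.1, q.2) = q by rw [← hqfst]]⟩, fun h => absurd rfl h⟩)
  have hsub1 : ∀ qc ∈ l1, qc ∈ casualTab := fun qc hq => htab ▸ (by simp [hq])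
  have hsub2 : ∀ qc ∈ l2, qc ∈ casualTab := fun qc hq => htab ▸ (by simp [hq])
  simp only [List.foldl_append, List.foldl_cons]
  -- fold l1 past the matched phrase
  rw [foldl_keep l1 hsub1 pc.1
    (fun qc hq j hj => phrase_cross qc (hsub1 qc hq) pc hpc (hfst qc hq) j hj)]
  -- the matching pair rewrites the phrase
  have hrep : repC (pc.1 ++ l1.foldl repC z) pc = pc.2 ++ repC (l1.foldl repC z) pc := by
    rw [repC_eq _ o os ho, repC_eq _ o os ho,
      replaceL_pos pc.2 (ho ▸ (List.prefix_append pc.1 _ : pc.1 <+: pc.1 ++ l1.foldl repC z))]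
    congr 1
    rw [← ho, List.drop_append_of_le_length le_rfl, List.drop_length, List.nil_append]
  rw [hrep]
  -- fold l2 past the contraction
  exact foldl_keep l2 hsub2 pc.2
    (fun qc hq j hj => phrase_vs_contraction qc (hsub2 qc hq) pc hpc j hj) _

theorem casualScan_cons_none (c : Char) (t : List Char)
    (hf : casualTab.find? (fun pc => pc.1.isPrefixOf (c :: t)) = none) :
    casualScan (c :: t) = c :: casualScan t := by
  rw [casualScan]
  split <;> rename_i heq <;> rw [hf] at heq
  all_goals first | rfl | exact absurd heq (by simp)

theorem casualScan_cons_some (c : Char) (t : List Char) (pc : List Char × List Char)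
    (hf : casualTab.find? (fun pc => pc.1.isPrefixOf (c :: t)) = some pc) :
    casualScan (c :: t) = pc.2 ++ casualScan ((c :: t).drop pc.1.length) := by
  rw [casualScan]
  split <;> rename_i heq <;> rw [hf] at heq
  all_goals first | rw [Option.some_inj.mp heq] | exact absurd heq (by simp)

theorem pipeline_eq_scan : ∀ n (s : List Char), s.length ≤ n →
    casualTab.foldl repC s = casualScan s := by
  intro n
  induction n with
  | zero =>
    intro s h
    have : s = [] := List.eq_nil_of_length_eq_zero (Nat.le_zero.mp h)
    subst this
    rw [show casualScan [] = [] from by rw [casualScan]]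
    decide
  | succ n ih =>
    intro s h
    cases s with
    | nil =>
      rw [show casualScan [] = [] from by rw [casualScan]]
      decide
    | cons c t =>
      cases hf : casualTab.find? (fun pc => pc.1.isPrefixOf (c :: t)) with
      | none =>
        rw [casualScan_cons_none c t hf]
        have hnone := List.find?_eq_none.mp hf
        rw [foldl_cons casualTab (fun pc h => h) c t
          (fun pc hpc hp => by simpa [List.isPrefixOf_iff_prefix.mpr hp] using hnone pc hpc)]
        rw [ih t (by simp at h; omega)]
      | some pc =>
        have hmem := List.mem_of_find?_eq_some hf
        have hsat : pc.1.isPrefixOf (c :: t) = true :=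
          List.find?_some (p := fun (pc : List Char × List Char) => pc.1.isPrefixOf (c :: t)) hf
        have hpre : pc.1 <+: (c :: t) := List.isPrefixOf_iff_prefix.mp hsat
        rw [casualScan_cons_some c t pc hf, pipeline_match hmem hpre]
        have h1 : 0 < pc.1.length := List.length_pos_iff.mpr (casualTab_fst_ne_nil pc hmem)
        rw [ih ((c :: t).drop pc.1.length) (by simp [List.length_drop] at h ⊢; omega)]

-- ===== VERDICT (by name: the statement is the Claim_ definition above) =====
theorem make_casual_py_spec : Claim_equal_make_casual_py := by
  intro message _
  unfold Spec_make_casual_py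
  apply String.toList_inj.mp
  rw [make_casual_py, make_casual_py_alt]
  rw [← pipeline_eq_scan message.toList.length message.toList le_rfl]
  simp [casualReplacements, casualTab, List.foldl, repC, PySem.Str.toList_replace]
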